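-- pv_equiv track=rewrite | github.com/Jejis06/ASD | cw1/Zadania.py | first_val
-- ===== SOURCE A (Python) =====
-- def first_val(T):
--     n = len(T)
--     left = 0
--     right = n -1
--
--     while left <= right:
--         mid = (left + right) // 2
--         if T[mid] == mid:
--             left = mid + 1
--         else:
--             right = mid - 1
--     return right
-- ===== SOURCE B (Python) =====
-- def first_val(T):
--     def go(lo, n):
--         # segment of n elements starting at lo; empty segment answers lo - 1
--         if n == 0:
--             return lo - 1
--         half = (n - 1) // 2
--         mid = lo + half
--         if T[mid] == mid:
--             return go(mid + 1, n - 1 - half)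
--         return go(lo, half)
--     return go(0, len(T))
-- ===== Notes on version B (the rewrite author's own statement) =====
-- stated objective: alternative
-- what changed: Replaces the two-pointer while-loop by a recursion over (start, segment-size): state is a Nat size with an n==0 base case returning lo-1 and half=(n-1)//2 offset arithmetic, instead of left/right pointers with a left<=right test.
import Mathlib
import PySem

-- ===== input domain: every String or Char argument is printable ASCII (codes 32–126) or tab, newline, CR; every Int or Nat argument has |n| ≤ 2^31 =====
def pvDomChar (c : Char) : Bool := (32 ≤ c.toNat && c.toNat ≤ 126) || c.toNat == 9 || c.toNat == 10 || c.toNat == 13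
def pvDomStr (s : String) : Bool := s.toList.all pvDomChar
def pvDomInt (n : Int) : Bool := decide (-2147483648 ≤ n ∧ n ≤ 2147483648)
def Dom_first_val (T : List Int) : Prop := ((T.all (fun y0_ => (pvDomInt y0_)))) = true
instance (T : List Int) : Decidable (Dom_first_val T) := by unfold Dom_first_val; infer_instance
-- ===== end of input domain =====

-- B replaces the left/right two-pointer while-loop by a recursion over (start, segment size) (objective: alternative).

-- ===== PORT A =====
-- T[mid] is always in range on reachable calls; .getD 0 is the value there, exactly Python's T[mid].
def first_val_loop (T : List Int) (left right : Int) : Int :=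
  if _h : left ≤ right then
    let mid := PySem.Int.floordiv (left + right) 2
    if (PySem.List.pyGet? T mid).getD 0 = mid then
      first_val_loop T (mid + 1) right
    else
      first_val_loop T left (mid - 1)
  else right
termination_by (right + 1 - left).toNat
decreasing_by
  all_goals
    have := PySem.Int.floordiv_two_mid_bounds _h
    omega

def first_val (T : List Int) : Int :=
  first_val_loop T 0 (T.length - 1)

-- ===== PORT B =====
def first_val_go (T : List Int) (lo : Int) : Nat → Int
  | 0 => lo - 1
  | (n + 1) =>
    let half := n / 2
    let mid := lo + (half : Int)
    if (PySem.List.pyGet? T mid).getD 0 = mid then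
      first_val_go T (mid + 1) (n - half)
    else
      first_val_go T lo half
termination_by n => n
decreasing_by all_goals omega

def first_val_alt (T : List Int) : Int :=
  first_val_go T 0 T.length

-- ===== PRECONDITION & SPEC =====
def Spec_first_val (T : List Int) (out : Int) : Prop := out = first_val_alt T
instance (T : List Int) (out : Int) : Decidable (Spec_first_val T out) := by unfold Spec_first_val; infer_instance

-- ===== CLAIM (what is proved, stated in full; the proofs are below) =====
def Claim_equal_first_val : Prop := ∀ (T : List Int), Dom_first_val T → Spec_first_val T (first_val T)

-- ===== LEMMAS AND PROOFS =====

-- B's (lo, n)-segment recursion computes A's loop on the interval [lo, lo+n-1]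
theorem pv_go_eq_loop (T : List Int) (lo : Int) (n : Nat) :
    first_val_go T lo n = first_val_loop T lo (lo + n - 1) := by
  match n with
  | 0 =>
    rw [first_val_go, first_val_loop, dif_neg (by omega)]
    norm_num
  | Nat.succ m =>
    rw [first_val_go, first_val_loop, dif_pos (by push_cast; omega)]
    have hmid : PySem.Int.floordiv (lo + (lo + (m + 1 : Nat) - 1)) 2 = lo + ((m / 2 : Nat) : Int) := by
      rw [PySem.Int.floordiv_eq_ediv_of_pos (by omega : (0:Int) < 2)]
      push_cast
      omega
    dsimp only
    rw [hmid]
    by_cases he : (PySem.List.pyGet? T (lo + ((m / 2 : Nat) : Int))).getD 0 = lo + ((m / 2 : Nat) : Int)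
    · rw [if_pos he, if_pos he, pv_go_eq_loop T _ (m - m / 2)]
      congr 1
      push_cast
      omega
    · rw [if_neg he, if_neg he, pv_go_eq_loop T lo (m / 2)]
termination_by n
decreasing_by all_goals omega

-- ===== VERDICT (by name: the statement is the Claim_ definition above) =====
theorem first_val_spec : Claim_equal_first_val := by
  intro T _
  unfold Spec_first_val first_val first_val_alt
  rw [pv_go_eq_loop]
  norm_num
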